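-- pv_equiv track=rewrite | github.com/muneebaifrah/Unstop-100-Days-Coding-Sprint | Day-62/3.Score_on_the_Edge.py | calculate_max_score
-- ===== SOURCE A (Python) =====
-- def calculate_max_score(n):
--     """
--     Write your logic here.
--     Parameters:
--         n (int): An integer representing the input value
--     Returns:
--         int: Computed result based on the problem statement
--     """
--     from collections import defaultdict
--     MAX = 100001
--     adj = defaultdict(list)
--
--
--     # Build the graph with weighted edges
--     for i in range(2, n + 1):
--         for j in range(i * 2, n + 1, i):
--             weight = j // i
--             for u in (i, -i):
--                 for v in (j, -j):
--                     adj[i + MAX].append((v, weight))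
--
--     # Sum all edge weights connected to nodes from 2 to n
--     ans = 0
--     for i in range(2, n + 1):
--         ans += sum(weight for _, weight in adj[i + MAX])
--
--     return ans
-- ===== SOURCE B (Python) =====
-- def calculate_max_score(n):
--     # Closed form: for each i, the weights over multiples j=2i..n of i are 2..q (q = n//i),
--     # each counted 4 times; sum_{k=2}^{q} k = q*(q+1)//2 - 1.
--     ans = 0
--     for i in range(2, n + 1):
--         q = n // i
--         if q >= 2:
--             ans += 4 * (q * (q + 1) // 2 - 1)
--     return ans
-- ===== Notes on version B (the rewrite author's own statement) =====
-- stated objective: faster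
-- what changed: Instead of materialising a graph adjacency dict with four weighted edge copies per multiple and then summing it, B sums a closed form per i: each i contributes 4*(q*(q+1)//2 - 1) with q = n//i, eliminating the inner multiples loop and all list building.
import Mathlib
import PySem

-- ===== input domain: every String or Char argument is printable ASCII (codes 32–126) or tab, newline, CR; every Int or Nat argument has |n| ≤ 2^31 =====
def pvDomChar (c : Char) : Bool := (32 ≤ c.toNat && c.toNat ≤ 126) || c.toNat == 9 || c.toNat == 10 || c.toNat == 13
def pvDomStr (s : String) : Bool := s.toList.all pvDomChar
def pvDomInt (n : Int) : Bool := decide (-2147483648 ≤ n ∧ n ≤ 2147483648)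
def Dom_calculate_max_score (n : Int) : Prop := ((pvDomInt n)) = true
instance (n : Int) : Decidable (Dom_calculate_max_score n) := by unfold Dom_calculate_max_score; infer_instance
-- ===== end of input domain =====

-- B replaces A's graph-building dict (four edge copies per multiple, then summed) by a
-- per-i closed form 4*(q*(q+1)//2 - 1), q = n // i; measured faster (asymptotic: the
-- inner multiples loop and all list building disappear).

-- ===== PORT A =====
-- A-side helpers: the bodies of A's nested loops, named so that the file can speak about them.
def pvAInner (i MAX : Int) (adj : PySem.Dict Int (List (Int × Int))) (j : Int) :
    PySem.Dict Int (List (Int × Int)) :=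
  let weight := PySem.Int.floordiv j i
  ([i, -i]).foldl (fun adj _u =>
    ([j, -j]).foldl (fun adj v =>
      adj.insert (i + MAX) (adj.getD (i + MAX) [] ++ [(v, weight)])) adj) adj

def pvAStep (n MAX : Int) (adj : PySem.Dict Int (List (Int × Int))) (i : Int) :
    PySem.Dict Int (List (Int × Int)) :=
  (PySem.List.pyRange (i * 2) (n + 1) i).foldl (pvAInner i MAX) adj

def calculate_max_score (n : Int) : Int :=
  let MAX : Int := 100001
  let adj := (PySem.List.pyRange 2 (n + 1) 1).foldl (pvAStep n MAX) PySem.Dict.empty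
  (PySem.List.pyRange 2 (n + 1) 1).foldl (fun ans i =>
    ans + ((adj.getD (i + MAX) []).map (fun p => p.2)).sum) 0

-- ===== PORT B =====
def calculate_max_score_alt (n : Int) : Int :=
  (PySem.List.pyRange 2 (n + 1) 1).foldl (fun ans i =>
    let q := PySem.Int.floordiv n i
    if 2 ≤ q then ans + 4 * (PySem.Int.floordiv (q * (q + 1)) 2 - 1) else ans) 0

-- ===== PRECONDITION & SPEC =====
def Spec_calculate_max_score (n : Int) (out : Int) : Prop := out = calculate_max_score_alt n
instance (n : Int) (out : Int) : Decidable (Spec_calculate_max_score n out) := by unfold Spec_calculate_max_score; infer_instance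

-- ===== CLAIM (what is proved, stated in full; the proofs are below) =====
def Claim_equal_calculate_max_score : Prop := ∀ (n : Int), Dom_calculate_max_score n → Spec_calculate_max_score n (calculate_max_score n)

-- ===== LEMMAS AND PROOFS =====

-- The list A accumulates at key i + MAX while processing outer index i.
def pvEntries (n i : Int) : List (Int × Int) :=
  (PySem.List.pyRange (i * 2) (n + 1) i).flatMap (fun j =>
    [(j, PySem.Int.floordiv j i), (-j, PySem.Int.floordiv j i),
     (j, PySem.Int.floordiv j i), (-j, PySem.Int.floordiv j i)])

theorem pvAInner_getD_self (i MAX j : Int) (d : PySem.Dict Int (List (Int × Int))) :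
    (pvAInner i MAX d j).getD (i + MAX) [] =
      d.getD (i + MAX) [] ++
        [(j, PySem.Int.floordiv j i), (-j, PySem.Int.floordiv j i),
         (j, PySem.Int.floordiv j i), (-j, PySem.Int.floordiv j i)] := by
  simp [pvAInner, List.foldl, PySem.Dict.getD_insert_self]

theorem pvAInner_getD_ne (i MAX j k : Int) (hk : k ≠ i + MAX)
    (d : PySem.Dict Int (List (Int × Int))) :
    (pvAInner i MAX d j).getD k [] = d.getD k [] := by
  simp [pvAInner, List.foldl, PySem.Dict.getD_insert_of_ne _ _ _ hk]

theorem pvAInner_fold_self (i MAX : Int) (l : List Int)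
    (d : PySem.Dict Int (List (Int × Int))) :
    (l.foldl (pvAInner i MAX) d).getD (i + MAX) [] =
      d.getD (i + MAX) [] ++ l.flatMap (fun j =>
        [(j, PySem.Int.floordiv j i), (-j, PySem.Int.floordiv j i),
         (j, PySem.Int.floordiv j i), (-j, PySem.Int.floordiv j i)]) := by
  induction l generalizing d with
  | nil => simp
  | cons a l ih => simp [List.foldl, ih, pvAInner_getD_self]

theorem pvAInner_fold_ne (i MAX k : Int) (hk : k ≠ i + MAX) (l : List Int)
    (d : PySem.Dict Int (List (Int × Int))) :
    (l.foldl (pvAInner i MAX) d).getD k [] = d.getD k [] := by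
  induction l generalizing d with
  | nil => rfl
  | cons a l ih => simp [List.foldl, ih, pvAInner_getD_ne _ _ _ _ hk]

theorem pvAStep_getD_self (n MAX i : Int) (d : PySem.Dict Int (List (Int × Int))) :
    (pvAStep n MAX d i).getD (i + MAX) [] = d.getD (i + MAX) [] ++ pvEntries n i := by
  simp [pvAStep, pvEntries, pvAInner_fold_self]

theorem pvAStep_getD_ne (n MAX i k : Int) (hk : k ≠ i + MAX)
    (d : PySem.Dict Int (List (Int × Int))) :
    (pvAStep n MAX d i).getD k [] = d.getD k [] := by
  simp [pvAStep, pvAInner_fold_ne _ _ _ hk]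

theorem pvBuild_getD_ne (n MAX i : Int) (l : List Int) (hl : ∀ x ∈ l, x ≠ i)
    (d : PySem.Dict Int (List (Int × Int))) :
    (l.foldl (pvAStep n MAX) d).getD (i + MAX) [] = d.getD (i + MAX) [] := by
  induction l generalizing d with
  | nil => rfl
  | cons a l ih =>
    have ha : a ≠ i := hl a (by simp)
    have := ih (fun x hx => hl x (by simp [hx]))
    simp only [List.foldl, this]
    exact pvAStep_getD_ne n MAX a (i + MAX) (by omega) d

theorem pvBuild_getD (n MAX i : Int) (l : List Int) (hl : l.Nodup) (hi : i ∈ l)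
    (d : PySem.Dict Int (List (Int × Int))) (hd : d.getD (i + MAX) [] = []) :
    (l.foldl (pvAStep n MAX) d).getD (i + MAX) [] = pvEntries n i := by
  induction l generalizing d with
  | nil => simp at hi
  | cons a l ih =>
    rcases List.mem_cons.mp hi with rfl | hi'
    · have hnotin : ∀ x ∈ l, x ≠ i := fun x hx => by
        rintro rfl; exact (List.nodup_cons.mp hl).1 hx
      simp only [List.foldl]
      rw [pvBuild_getD_ne n MAX i l hnotin, pvAStep_getD_self, hd, List.nil_append]
    · have ha : a ≠ i := by rintro rfl; exact (List.nodup_cons.mp hl).1 hi'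
      simp only [List.foldl]
      exact ih (List.nodup_cons.mp hl).2 hi' _
        (by rw [pvAStep_getD_ne n MAX a (i + MAX) (by omega) d]; exact hd)

theorem pvEntries_sum_aux (i : Int) (l : List Int) :
    ((l.flatMap (fun j =>
        [(j, PySem.Int.floordiv j i), (-j, PySem.Int.floordiv j i),
         (j, PySem.Int.floordiv j i), (-j, PySem.Int.floordiv j i)])).map
        (fun p : Int × Int => p.2)).sum =
      4 * ((l.map (fun j => PySem.Int.floordiv j i)).sum) := by
  induction l with
  | nil => simp
  | cons a l ih => simp [ih]; ring

theorem pvGauss (m : Nat) :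
    (((List.range m).map (fun k : Nat => (2 : Int) + (k : Int))).sum) * 2 =
      (m : Int) * ((m : Int) + 3) := by
  induction m with
  | zero => simp
  | succ m ih =>
    rw [List.range_succ]
    simp only [List.map_append, List.sum_append, List.map_cons, List.map_nil,
      List.sum_cons, List.sum_nil]
    push_cast
    linear_combination ih

-- per-i value of A's accumulated weights, as B's closed form
theorem pvPerI (n i : Int) (hi : 2 ≤ i) :
    ((PySem.List.pyRange (i * 2) (n + 1) i).map (fun j => PySem.Int.floordiv j i)).sum =
      if 2 ≤ PySem.Int.floordiv n i then
        PySem.Int.floordiv (PySem.Int.floordiv n i * (PySem.Int.floordiv n i + 1)) 2 - 1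
      else 0 := by
  have hipos : (0 : Int) < i := by omega
  have hine : i ≠ 0 := by omega
  rw [PySem.List.pyRange_of_pos _ _ hipos]
  set q : Int := PySem.Int.floordiv n i with hq
  have hqe : q = n / i := by rw [hq, PySem.Int.floordiv_eq_ediv_of_pos hipos]
  by_cases h2 : 2 ≤ q
  · -- q ≥ 2 : 2*i ≤ n, the range has (q-1) elements with floordiv values 2..q
    have hle : i * 2 ≤ n := by
      have := (Int.le_ediv_iff_mul_le hipos).mp (hqe ▸ h2)
      omega
    have hlt : i * 2 < n + 1 := by omega
    rw [if_pos hlt]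
    have hcnt : (n + 1 - i * 2 + i - 1) / i = q - 1 := by
      have : n + 1 - i * 2 + i - 1 = n + i * (-1) := by ring
      rw [this, Int.add_mul_ediv_left n (-1) hine, hqe]; omega
    rw [hcnt]
    have hmn : (((q - 1).toNat : Int)) = q - 1 := Int.toNat_of_nonneg (by omega)
    have hmap : ∀ k : Nat, PySem.Int.floordiv (i * 2 + i * (k : Int)) i = 2 + (k : Int) := by
      intro k
      rw [PySem.Int.floordiv_eq_ediv_of_pos hipos]
      have : i * 2 + i * (k : Int) = i * (2 + (k : Int)) := by ring
      rw [this, Int.mul_ediv_cancel_left _ hine]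
    rw [List.map_map]
    have hmapeq : ((List.range (q - 1).toNat).map
        ((fun j => PySem.Int.floordiv j i) ∘ fun k : Nat => i * 2 + i * (k : Int))) =
        (List.range (q - 1).toNat).map (fun k : Nat => (2 : Int) + (k : Int)) :=
      List.map_congr_left (fun k _ => hmap k)
    rw [hmapeq]
    have hS := pvGauss (q - 1).toNat
    rw [hmn] at hS
    rw [if_pos h2]
    obtain ⟨t, ht⟩ := (Int.even_mul_succ_self q)
    have htd : q * (q + 1) = 2 * t := by omega
    have h2' : (((List.range (q - 1).toNat).map (fun k : Nat => (2 : Int) + (k : Int))).sum) * 2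
        = 2 * t - 2 := by rw [hS]; linear_combination htd
    have hfd2 : PySem.Int.floordiv (q * (q + 1)) 2 = t := by
      rw [PySem.Int.floordiv_eq_ediv_of_pos (by norm_num), htd]; omega
    rw [hfd2]; omega
  · -- q < 2 : the multiples range is empty
    have hnlt : ¬ i * 2 < n + 1 := by
      intro hlt
      have : 2 ≤ n / i := (Int.le_ediv_iff_mul_le hipos).mpr (by omega)
      rw [← hqe] at this; omega
    rw [if_neg hnlt, if_neg h2]
    simp

theorem pvA_closed (n : Int) :
    calculate_max_score n =
      (PySem.List.pyRange 2 (n + 1) 1).foldl (fun ans i =>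
        ans + ((pvEntries n i).map (fun p : Int × Int => p.2)).sum) 0 := by
  unfold calculate_max_score
  apply PySem.List.foldl_congr_mem
  intro acc i hi
  congr 1
  rw [pvBuild_getD n 100001 i _ (PySem.List.nodup_pyRange_one 2 (n + 1)) hi
      PySem.Dict.empty (by rfl)]

-- ===== VERDICT (by name: the statement is the Claim_ definition above) =====
theorem calculate_max_score_spec : Claim_equal_calculate_max_score := by
  unfold Claim_equal_calculate_max_score
  intro n _
  unfold Spec_calculate_max_score
  rw [pvA_closed]
  unfold calculate_max_score_alt
  apply PySem.List.foldl_congr_mem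
  intro acc i hi
  have hi2 : (2 : Int) ≤ i := ((PySem.List.mem_pyRange_one).mp hi).1
  rw [pvEntries, pvEntries_sum_aux, pvPerI n i hi2]
  by_cases h2 : 2 ≤ PySem.Int.floordiv n i
  · simp [h2]
  · simp [h2]
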